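-- pv_equiv track=rewrite | github.com/yonsweng/ps | codeforces/1625/b.py | solve
-- ===== SOURCE A (Python) =====
-- def solve(n, a):
--     answer = -1
--
--     c = {}
--     for i, ai in enumerate(a):
--         if ai in c:
--             answer = max(answer, n - (i - c[ai]))
--         c[ai] = i
--
--     return answer
-- ===== SOURCE B (Python) =====
-- def solve(n, a):
--     pos = {}
--     for i, x in enumerate(a):
--         pos.setdefault(x, []).append(i)
--     best = -1
--     for idxs in pos.values():
--         for p, q in zip(idxs, idxs[1:]):
--             best = max(best, n - (q - p))
--     return best
-- ===== Notes on version B (the rewrite author's own statement) =====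
-- stated objective: alternative
-- what changed: Instead of one pass keeping the last index of each value and updating the answer inline, B first groups all indices per value into a dict of lists, then a separate pass scans each group's consecutive index pairs and folds the best n - gap.
import Mathlib
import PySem

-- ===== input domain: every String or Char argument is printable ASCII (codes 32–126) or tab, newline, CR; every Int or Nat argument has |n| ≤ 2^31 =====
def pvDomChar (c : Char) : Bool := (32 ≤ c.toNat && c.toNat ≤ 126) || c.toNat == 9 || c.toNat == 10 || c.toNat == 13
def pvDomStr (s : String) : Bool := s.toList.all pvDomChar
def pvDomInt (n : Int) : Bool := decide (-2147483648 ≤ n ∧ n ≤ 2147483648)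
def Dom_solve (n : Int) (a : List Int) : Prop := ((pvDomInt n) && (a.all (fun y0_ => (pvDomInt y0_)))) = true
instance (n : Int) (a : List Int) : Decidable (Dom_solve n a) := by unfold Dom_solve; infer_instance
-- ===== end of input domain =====

-- B keeps A's behaviour but uses a different decomposition: a dict of per-value index lists built first,
-- then a group-scanning pass over consecutive index pairs (objective: alternative, same O(n) cost).

-- ===== PORT A =====
-- A's loop body: membership test on the last-seen dict, inline answer update, overwrite last index.
def stepA (n : Int) (st : Int × PySem.Dict Int Int) (p : Int × Int) : Int × PySem.Dict Int Int :=
  match st.2.get? p.2 with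
  | some j => (max st.1 (n - (p.1 - j)), st.2.insert p.2 p.1)
  | none   => (st.1, st.2.insert p.2 p.1)

def solve (n : Int) (a : List Int) : Int :=
  (List.foldl (stepA n) (-1, PySem.Dict.empty) (PySem.List.enumerate a)).1

-- ===== PORT B =====
-- B's first loop body: pos[x] = pos.get(x, []) + [i]
def stepPos (d : PySem.Dict Int (List Int)) (p : Int × Int) : PySem.Dict Int (List Int) :=
  d.insert p.2 (d.getD p.2 [] ++ [p.1])

-- B's inner loop body: best = max(best, n - (q - p))
def innerMax (n b : Int) (pq : Int × Int) : Int := max b (n - (pq.2 - pq.1))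

-- B's per-group scan: for p, q in zip(idxs, idxs[1:])
def groupMax (n b : Int) (idxs : List Int) : Int :=
  List.foldl (innerMax n) b (idxs.zip idxs.tail)

def solve_alt (n : Int) (a : List Int) : Int :=
  let pos := List.foldl stepPos PySem.Dict.empty (PySem.List.enumerate a)
  List.foldl (groupMax n) (-1) pos.values

-- ===== PRECONDITION & SPEC =====
def Spec_solve (n : Int) (a : List Int) (out : Int) : Prop := out = solve_alt n a
instance (n : Int) (a : List Int) (out : Int) : Decidable (Spec_solve n a out) := by unfold Spec_solve; infer_instance

-- ===== CLAIM (what is proved, stated in full; the proofs are below) =====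
def Claim_equal_solve : Prop := ∀ (n : Int) (a : List Int), Dom_solve n a → Spec_solve n a (solve n a)

-- ===== LEMMAS AND PROOFS =====

-- The joint invariant relating A's running state (answer, last-seen dict) to B's dict of index lists.
def AB_Inv (n : Int) (st : Int × PySem.Dict Int Int) (P : PySem.Dict Int (List Int)) : Prop :=
  P.keys.Nodup ∧
  (∀ q ∈ P.items, q.2 ≠ ([] : List Int)) ∧
  (∀ v : Int, st.2.get? v = (P.getD v []).getLast?) ∧
  st.1 = List.foldl (groupMax n) (-1) P.values

theorem innerMax_comm (n b : Int) (p q : Int × Int) :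
    innerMax n (innerMax n b p) q = innerMax n (innerMax n b q) p := by
  simp only [innerMax]; omega

theorem foldl_innerMax_comm (n : Int) (l : List (Int × Int)) (b : Int) (p : Int × Int) :
    List.foldl (innerMax n) (innerMax n b p) l = innerMax n (List.foldl (innerMax n) b l) p := by
  induction l generalizing b with
  | nil => rfl
  | cons q t ih => rw [List.foldl_cons, List.foldl_cons, innerMax_comm, ih]

theorem foldl_groupMax_innerMax (n : Int) (vs : List (List Int)) (b : Int) (p : Int × Int) :
    List.foldl (groupMax n) (innerMax n b p) vs = innerMax n (List.foldl (groupMax n) b vs) p := by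
  induction vs generalizing b with
  | nil => rfl
  | cons v t ih =>
      simp only [List.foldl_cons, groupMax, foldl_innerMax_comm, ih]

theorem zip_tail_snoc (ys : List Int) (a i : Int) :
    ((a :: ys) ++ [i]).zip (ys ++ [i]) =
      (a :: ys).zip ys ++ [((a :: ys).getLast (List.cons_ne_nil a ys), i)] := by
  induction ys generalizing a with
  | nil => rfl
  | cons b t ih =>
      simp only [List.cons_append, List.zip_cons_cons]
      have hbt : (b :: t) ≠ [] := List.cons_ne_nil b t
      have := ih b
      simp only [List.cons_append] at this
      rw [this, List.getLast_cons hbt]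

theorem groupMax_snoc (n b : Int) (ys : List Int) (i : Int) (h : ys ≠ []) :
    groupMax n b (ys ++ [i]) = innerMax n (groupMax n b ys) (ys.getLast h, i) := by
  cases ys with
  | nil => exact absurd rfl h
  | cons a t =>
      simp only [groupMax, List.cons_append, List.tail_cons]
      have : (a :: (t ++ [i])).zip (t ++ [i]) =
          (a :: t).zip t ++ [((a :: t).getLast (List.cons_ne_nil a t), i)] := by
        have := zip_tail_snoc t a i
        simpa using this
      rw [this, List.foldl_append]
      rfl

theorem AB_Inv_step (n : Int) (st : Int × PySem.Dict Int Int) (P : PySem.Dict Int (List Int))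
    (p : Int × Int) (h : AB_Inv n st P) : AB_Inv n (stepA n st p) (stepPos P p) := by
  obtain ⟨hnd, hne, hget, hans⟩ := h
  rcases hg : P.get? p.2 with _ | ys
  · -- fresh key
    have hc : P.contains p.2 = false := by
      rw [PySem.Dict.contains_eq_isSome_get?, hg]; rfl
    have hgd : P.getD p.2 [] = [] := PySem.Dict.getD_of_not_contains _ _ hc
    have hA : stepA n st p = (st.1, st.2.insert p.2 p.1) := by
      simp only [stepA, hget p.2, hgd, List.getLast?_nil]
    have hitems : (stepPos P p).items = P.items ++ [(p.2, [p.1])] := by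
      simp only [stepPos, hgd, List.nil_append]
      exact PySem.Dict.items_insert_of_not_contains _ _ hc
    refine ⟨PySem.Dict.nodup_keys_insert _ _ _ hnd, ?_, ?_, ?_⟩
    · intro q hq
      rw [hitems, List.mem_append] at hq
      rcases hq with hq | hq
      · exact hne q hq
      · simp only [List.mem_singleton] at hq; subst hq; simp
    · intro v
      by_cases hv : v = p.2
      · subst hv
        rw [hA]
        simp only [stepPos]
        rw [PySem.Dict.get?_insert_self, PySem.Dict.getD_insert_self, hgd]
        simp
      · rw [hA]
        simp only [stepPos]
        rw [PySem.Dict.get?_insert_of_ne _ _ hv, PySem.Dict.getD_insert_of_ne _ _ _ hv]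
        exact hget v
    · rw [hA]
      have hvals : (stepPos P p).values = P.values ++ [[p.1]] := by
        simp only [PySem.Dict.values, hitems, List.map_append]; rfl
      rw [hvals, List.foldl_append]
      simpa [groupMax] using hans
  · -- existing key
    have hmem : (p.2, ys) ∈ P.items := PySem.Dict.mem_items_of_get?_eq_some _ hg
    have hc : P.contains p.2 = true := by
      rw [PySem.Dict.contains_eq_isSome_get?, hg]; rfl
    have hgd : P.getD p.2 [] = ys := PySem.Dict.getD_of_get?_eq_some _ _ hg
    have hysne : ys ≠ [] := hne _ hmem
    obtain ⟨l1, l2, hsplit⟩ := List.append_of_mem hmem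
    have hkeys : P.keys = l1.map Prod.fst ++ p.2 :: l2.map Prod.fst := by
      simp only [PySem.Dict.keys, hsplit, List.map_append, List.map_cons]
    have hx1 : p.2 ∉ l1.map Prod.fst ∧ p.2 ∉ l2.map Prod.fst := by
      rw [hkeys] at hnd
      rcases List.nodup_append.mp hnd with ⟨h1, h2, h3⟩
      exact ⟨fun hm => h3 p.2 hm p.2 (by simp) rfl, (List.nodup_cons.mp h2).1⟩
    have hid : ∀ (l : List (Int × List Int)), p.2 ∉ l.map Prod.fst →
        l.map (fun q => if (q.1 == p.2) = true then (p.2, ys ++ [p.1]) else q) = l := by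
      intro l hl
      conv_rhs => rw [← List.map_id l]
      apply List.map_congr_left
      intro q hq
      have : q.1 ≠ p.2 := fun he => hl (he ▸ List.mem_map_of_mem hq)
      simp [this]
    have hitems : (stepPos P p).items = l1 ++ (p.2, ys ++ [p.1]) :: l2 := by
      simp only [stepPos, hgd]
      rw [PySem.Dict.items_insert_of_contains _ _ hc, hsplit]
      simp only [List.map_append, List.map_cons, BEq.rfl, if_pos]
      rw [hid l1 hx1.1, hid l2 hx1.2]
    have hlast : ys.getLast? = some (ys.getLast hysne) := List.getLast?_eq_some_getLast hysne
    have hA : stepA n st p =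
        (max st.1 (n - (p.1 - ys.getLast hysne)), st.2.insert p.2 p.1) := by
      simp only [stepA, hget p.2, hgd, hlast]
    refine ⟨PySem.Dict.nodup_keys_insert _ _ _ hnd, ?_, ?_, ?_⟩
    · intro q hq
      rw [hitems, List.mem_append, List.mem_cons] at hq
      rcases hq with hq | hq | hq
      · exact hne q (hsplit ▸ (by simp [List.mem_append, hq]))
      · subst hq; simp
      · exact hne q (hsplit ▸ (by simp [List.mem_append, List.mem_cons, hq]))
    · intro v
      by_cases hv : v = p.2
      · subst hv
        rw [hA]
        simp only [stepPos]
        rw [PySem.Dict.get?_insert_self, PySem.Dict.getD_insert_self, hgd]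
        simp
      · rw [hA]
        simp only [stepPos]
        rw [PySem.Dict.get?_insert_of_ne _ _ hv, PySem.Dict.getD_insert_of_ne _ _ _ hv]
        exact hget v
    · rw [hA]
      have hvalsOld : P.values = l1.map Prod.snd ++ ys :: l2.map Prod.snd := by
        simp only [PySem.Dict.values, hsplit, List.map_append, List.map_cons]
      have hvals : (stepPos P p).values =
          l1.map Prod.snd ++ (ys ++ [p.1]) :: l2.map Prod.snd := by
        simp only [PySem.Dict.values, hitems, List.map_append, List.map_cons]
      rw [hvals, List.foldl_append, List.foldl_cons,
          groupMax_snoc n _ ys _ hysne, foldl_groupMax_innerMax]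
      rw [hans, hvalsOld, List.foldl_append, List.foldl_cons]
      simp only [innerMax]

theorem AB_Inv_foldl (n : Int) (l : List (Int × Int)) (st : Int × PySem.Dict Int Int)
    (P : PySem.Dict Int (List Int)) (h : AB_Inv n st P) :
    AB_Inv n (List.foldl (stepA n) st l) (List.foldl stepPos P l) := by
  induction l generalizing st P with
  | nil => exact h
  | cons p t ih => exact ih _ _ (AB_Inv_step n st P p h)

theorem AB_Inv_init (n : Int) : AB_Inv n (-1, PySem.Dict.empty) PySem.Dict.empty := by
  refine ⟨?_, ?_, ?_, rfl⟩
  · simp [PySem.Dict.keys_empty]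
  · intro q hq
    simp [PySem.Dict.empty] at hq
  · intro v
    simp [PySem.Dict.get?_empty, PySem.Dict.getD_empty]

-- ===== VERDICT (by name: the statement is the Claim_ definition above) =====
theorem solve_spec : Claim_equal_solve := by
  intro n a _
  unfold Spec_solve solve solve_alt
  exact (AB_Inv_foldl n (PySem.List.enumerate a) _ _ (AB_Inv_init n)).2.2.2
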